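-- pv_equiv track=rewrite | github.com/981377660LMT/algorithm-study | 22_专题/k-part-sum/5289. 公平分发饼干-回溯+二分.py | distributeCookies
-- ===== SOURCE A (Python) =====
-- from typing import List
--
-- def distributeCookies(cookies: List[int], k: int) -> int:
--     def check(mid: int) -> bool:
--         """分割成k组,各组和的最大值小于等于mid"""
--
--         def dfs(index: int, groups: List[int]) -> bool:
--             if index == n:
--                 return True
--             for i in range(k):
--                 if groups[i] + cookies[index] <= mid:
--                     groups[i] += cookies[index]
--                     if dfs(index + 1, groups):
--                         return True
--                     groups[i] -= cookies[index]
--             return False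
--
--         return dfs(0, [0] * k)
--
--     cookies.sort(reverse=True)
--     n = len(cookies)
--     left, right = max(cookies), sum(cookies)
--     while left <= right:
--         mid = (left + right) // 2
--         if check(mid):
--             right = mid - 1
--         else:
--             left = mid + 1
--     return left
-- ===== SOURCE B (Python) =====
-- def distributeCookies(cookies, k):
--     cookies.sort(reverse=True)
--
--     def feasible(m):
--         # pack remaining items into the groups 'pre + post' (pre already scanned for
--         # the current item); never try two groups with the same current sum (seen)
--         def pack(items, pre, post, seen):
--             if not items:
--                 return True
--             if not post:
--                 return False
--             s = post[0]
--             if s in seen: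
--                 return pack(items, pre + [s], post[1:], seen)
--             if s + items[0] <= m and pack(items[1:], [], pre + [s + items[0]] + post[1:], set()):
--                 return True
--             return pack(items, pre + [s], post[1:], seen | {s})
--         return pack(cookies, [], [0] * k, set())
--
--     lo, hi = max(cookies), sum(cookies)
--
--     # recursive binary search on the gap (number of candidate answers left)
--     def search(lo, gap):
--         if gap == 0:
--             return lo
--         h = (gap - 1) // 2
--         if feasible(lo + h):
--             return search(lo, h)
--         return search(lo + h + 1, gap - h - 1)
--
--     return search(lo, max(hi + 1 - lo, 0))
-- ===== Notes on version B (the rewrite author's own statement) =====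
-- stated objective: alternative
-- what changed: B replaces A's index-loop backtracking over a mutable group array by a zipper-style recursion over the group list with symmetry pruning (a cookie is never tried in two groups with equal current sum, tracked in a seen-set), and A's imperative while-loop binary search by a recursive binary search on the remaining gap.
import Mathlib
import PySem

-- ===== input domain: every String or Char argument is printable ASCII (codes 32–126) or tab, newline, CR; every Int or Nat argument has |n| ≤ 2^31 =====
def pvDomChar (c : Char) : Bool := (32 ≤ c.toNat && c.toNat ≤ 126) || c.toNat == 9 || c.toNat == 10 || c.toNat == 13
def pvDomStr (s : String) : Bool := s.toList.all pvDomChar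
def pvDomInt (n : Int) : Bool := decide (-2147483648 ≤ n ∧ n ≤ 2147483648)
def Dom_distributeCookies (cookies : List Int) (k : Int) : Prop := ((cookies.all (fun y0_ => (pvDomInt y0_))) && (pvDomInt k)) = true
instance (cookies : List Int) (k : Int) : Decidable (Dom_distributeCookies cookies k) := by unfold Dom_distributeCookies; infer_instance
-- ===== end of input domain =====

-- B replaces A's index-loop backtracking by a zipper-style recursion over the groups with
-- symmetry pruning (a cookie is never tried in two groups with equal current sum) and the
-- imperative while-loop binary search by a recursive search on the gap; same return value.
-- Both A and B sort `cookies` in place (same observable mutation); equivalence is about the return value.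

-- ===== PORT A =====
-- the `for i in range(k)` loop of A's dfs, from index i with `fuel` indices left (i + fuel = k)
def tryA (mid c : Int) (f : List Int → Bool) (groups : List Int) : Nat → Nat → Bool
  | _, 0 => false
  | i, fuel+1 =>
    let s := groups.getD i 0
    if s + c ≤ mid then
      if f (groups.set i (s + c)) then true
      else tryA mid c f groups (i+1) fuel
    else tryA mid c f groups (i+1) fuel

-- A's dfs, recursing over the remaining cookies (Python's `index` walks the list)
def dfsA (mid : Int) : List Int → List Int → Bool
  | [], _ => true
  | c :: rest, groups => tryA mid c (dfsA mid rest) groups 0 groups.length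

def checkA (cookies : List Int) (k : Int) (mid : Int) : Bool :=
  dfsA mid cookies (List.replicate k.toNat 0)

-- A's `while left <= right` binary-search loop; the Nat fuel only totalizes the loop
-- (the gap right+1-left strictly shrinks each iteration, so the fuel passed below never runs out)
def bsearchA (cookies : List Int) (k : Int) : Nat → Int → Int → Int
  | 0, left, _ => left
  | fuel+1, left, right =>
    if left ≤ right then
      let mid := PySem.Int.floordiv (left + right) 2
      if checkA cookies k mid then bsearchA cookies k fuel left (mid - 1)
      else bsearchA cookies k fuel (mid + 1) right
    else left

def distributeCookies (cookies : List Int) (k : Int) : Int :=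
  let sc := PySem.List.sorted cookies (fun x => x) true
  let left := ((PySem.List.max? sc (fun x => x)).getD 0)  -- max(cookies); ValueError on [] is excluded by Pre_
  let right := sc.sum
  bsearchA sc k (right + 1 - left).toNat left right

-- ===== PORT B =====
-- B's pack: items still to place, groups split as pre ++ post (pre already scanned for the
-- head item), `seen` = group sums already tried for the head item (symmetry pruning)
def packB (m : Int) : List Int → List Int → List Int → PySem.Set Int → Bool
  | [], _, _, _ => true
  | _ :: _, _, [], _ => false
  | c :: rest, pre, s :: post, seen =>
    if PySem.Set.contains seen s then
      packB m (c :: rest) (pre ++ [s]) post seen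
    else if decide (s + c ≤ m) && packB m rest [] (pre ++ (s + c) :: post) PySem.Set.empty then
      true
    else
      packB m (c :: rest) (pre ++ [s]) post (PySem.Set.add seen s)
termination_by items _ post _ => (items.length, post.length)
decreasing_by all_goals simp_all; omega

def feasB (cookies : List Int) (k : Int) (m : Int) : Bool :=
  packB m cookies [] (List.replicate k.toNat 0) PySem.Set.empty

-- B's recursive binary search: `gap` candidate answers starting at lo
def searchB (cookies : List Int) (k : Int) : Int → Nat → Int
  | lo, 0 => lo
  | lo, gap+1 =>
    let h := gap / 2
    if feasB cookies k (lo + h) then searchB cookies k lo h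
    else searchB cookies k (lo + h + 1) (gap - h)
termination_by _ gap => gap
decreasing_by all_goals omega

def distributeCookies_alt (cookies : List Int) (k : Int) : Int :=
  let sc := PySem.List.sorted cookies (fun x => x) true
  let lo := ((PySem.List.max? sc (fun x => x)).getD 0)
  let hi := sc.sum
  searchB sc k lo (hi + 1 - lo).toNat

-- ===== PRECONDITION & SPEC =====
-- Pre_ excludes only the empty list, on which Python's max(cookies) raises ValueError (in A and in B alike).
def Pre_distributeCookies (cookies : List Int) (k : Int) : Prop := cookies ≠ []
instance (cookies : List Int) (k : Int) : Decidable (Pre_distributeCookies cookies k) := by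
  unfold Pre_distributeCookies; infer_instance

def pvWitness_distributeCookies : List Int × Int := ([3, 1, 2], 2)

def Spec_distributeCookies (cookies : List Int) (k : Int) (out : Int) : Prop := out = distributeCookies_alt cookies k
instance (cookies : List Int) (k : Int) (out : Int) : Decidable (Spec_distributeCookies cookies k out) := by unfold Spec_distributeCookies; infer_instance

-- ===== CLAIM (what is proved, stated in full; the proofs are below) =====
def Claim_equal_distributeCookies : Prop := ∀ (cookies : List Int) (k : Int), Dom_distributeCookies cookies k → Pre_distributeCookies cookies k → Spec_distributeCookies cookies k (distributeCookies cookies k)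

-- ===== LEMMAS AND PROOFS =====

theorem tryA_iff (mid c : Int) (f : List Int → Bool) (groups : List Int) (i fuel : Nat) :
    tryA mid c f groups i fuel = true ↔
      ∃ j, i ≤ j ∧ j < i + fuel ∧ groups.getD j 0 + c ≤ mid ∧
        f (groups.set j (groups.getD j 0 + c)) = true := by
  induction fuel generalizing i with
  | zero =>
    constructor
    · intro h; simp [tryA] at h
    · rintro ⟨j, h1, h2, -, -⟩; omega
  | succ fuel ih =>
    simp only [tryA]
    split_ifs with hg hf
    · constructor
      · intro _; exact ⟨i, le_refl i, by omega, hg, hf⟩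
      · intro _; rfl
    · rw [ih]
      constructor
      · rintro ⟨j, h1, h2, h3, h4⟩; exact ⟨j, by omega, by omega, h3, h4⟩
      · rintro ⟨j, h1, h2, h3, h4⟩
        refine ⟨j, ?_, by omega, h3, h4⟩
        rcases Nat.eq_or_lt_of_le h1 with h | h
        · exact absurd (h ▸ h4) hf
        · omega
    · rw [ih]
      constructor
      · rintro ⟨j, h1, h2, h3, h4⟩; exact ⟨j, by omega, by omega, h3, h4⟩
      · rintro ⟨j, h1, h2, h3, h4⟩
        refine ⟨j, ?_, by omega, h3, h4⟩
        rcases Nat.eq_or_lt_of_le h1 with h | h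
        · exact absurd (h ▸ h3) hg
        · omega

-- the index transposition used for the symmetry argument
def tr (a b j : Nat) : Nat := if j = a then b else if j = b then a else j

theorem tr_lt (a b j n : Nat) (ha : a < n) (hb : b < n) (hj : j < n) : tr a b j < n := by
  unfold tr; split_ifs <;> omega

theorem tr_tr (a b j : Nat) : tr a b (tr a b j) = j := by
  unfold tr; split_ifs <;> omega

-- groups with positions a and b swapped
def swapG (g : List Int) (a b : Nat) : List Int :=
  (g.set a (g.getD b 0)).set b (g.getD a 0)

theorem getD_set' (g : List Int) (m j : Nat) (v : Int) (hm : m < g.length) :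
    (g.set m v).getD j 0 = if j = m then v else g.getD j 0 := by
  by_cases h : j = m
  · subst h; simp [List.getD_eq_getElem?_getD, hm]
  · simp [List.getD_eq_getElem?_getD, List.getElem?_set, h, Ne.symm h]

theorem getD_swapG (g : List Int) (a b j : Nat) (ha : a < g.length) (hb : b < g.length) :
    (swapG g a b).getD j 0 = g.getD (tr a b j) 0 := by
  unfold swapG tr
  rw [getD_set' _ b j _ (by simpa using hb), getD_set' _ a j _ ha]
  split_ifs <;> simp_all

theorem set_swapG (g : List Int) (a b j : Nat) (v : Int)
    (ha : a < g.length) (hb : b < g.length) (hj : j < g.length) :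
    (swapG g a b).set j v = swapG (g.set (tr a b j) v) a b := by
  apply List.ext_getElem?
  intro m
  simp only [swapG, tr, List.getElem?_set, List.length_set, List.getD_eq_getElem?_getD]
  split_ifs <;>
    simp_all [List.getElem?_set, List.getElem?_eq_getElem, ha, hb, hj] <;>
    split_ifs <;> simp_all <;> omega

theorem length_swapG (g : List Int) (a b : Nat) : (swapG g a b).length = g.length := by
  simp [swapG]

theorem dfsA_swap (mid : Int) (rest : List Int) (g : List Int) (a b : Nat)
    (ha : a < g.length) (hb : b < g.length) :
    dfsA mid rest (swapG g a b) = dfsA mid rest g := by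
  induction rest generalizing g with
  | nil => simp [dfsA]
  | cons c rest ih =>
    simp only [dfsA, length_swapG]
    apply Bool.coe_iff_coe.mp
    rw [tryA_iff, tryA_iff]
    constructor
    · rintro ⟨j, -, hj2, hle, hf⟩
      have hj : j < g.length := by omega
      refine ⟨tr a b j, Nat.zero_le _, by have := tr_lt a b j g.length ha hb hj; omega, ?_, ?_⟩
      · rwa [getD_swapG g a b j ha hb] at hle
      · rw [getD_swapG g a b j ha hb] at hf
        rw [set_swapG g a b j _ ha hb hj] at hf
        rw [ih _ (by simpa using ha) (by simpa using hb)] at hf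
        exact hf
    · rintro ⟨j, -, hj2, hle, hf⟩
      have hj : j < g.length := by omega
      refine ⟨tr a b j, Nat.zero_le _, by have := tr_lt a b j g.length ha hb hj; omega, ?_, ?_⟩
      · rw [getD_swapG g a b _ ha hb, tr_tr]; exact hle
      · rw [getD_swapG g a b _ ha hb, tr_tr]
        rw [set_swapG g a b _ _ ha hb (tr_lt a b j g.length ha hb hj), tr_tr]
        rw [ih _ (by simpa using ha) (by simpa using hb)]
        exact hf

theorem set_getD_self (g : List Int) (a : Nat) (ha : a < g.length) :
    g.set a (g.getD a 0) = g := by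
  apply List.ext_getElem?
  intro m
  by_cases hm : m = a <;> simp [List.getElem?_set, hm, ha, List.getD_eq_getElem?_getD]

-- equal current sums ⇒ the two branches are interchangeable
theorem dfsA_set_congr (mid : Int) (rest : List Int) (g : List Int) (a b : Nat) (v : Int)
    (ha : a < g.length) (hb : b < g.length) (hEq : g.getD a 0 = g.getD b 0) :
    dfsA mid rest (g.set a v) = dfsA mid rest (g.set b v) := by
  by_cases hab : a = b
  · subst hab; rfl
  · have h : g.set b v = swapG (g.set a v) a b := by
      unfold swapG
      have h1 : (g.set a v).getD b 0 = g.getD b 0 := by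
        simp [List.getD_eq_getElem?_getD, List.getElem?_set, hab]
      have h2 : (g.set a v).getD a 0 = v := by
        simp [List.getD_eq_getElem?_getD, ha]
      rw [h1, h2, ← hEq, List.set_set, set_getD_self g a ha]
    rw [h, dfsA_swap mid rest (g.set a v) a b (by simpa using ha) (by simpa using hb)]

-- the zipper view of getD/set at the split point
theorem zip_getD (pre : List Int) (s : Int) (post : List Int) :
    (pre ++ s :: post).getD pre.length 0 = s := by
  simp [List.getD_eq_getElem?_getD, List.getElem?_append_right (le_refl pre.length)]

theorem zip_set (pre : List Int) (s v : Int) (post : List Int) :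
    (pre ++ s :: post).set pre.length v = pre ++ v :: post := by
  rw [List.set_append_right _ _ (le_refl pre.length)]
  simp

-- pruning soundness for one item: the zipper loop with a seen-set equals A's plain index loop.
-- hinv: every sum in `seen` belongs to an earlier group whose branch (if admissible) failed.
theorem packB_step (m c : Int) (rest : List Int)
    (hcongr : ∀ (g : List Int) (a b : Nat) (v : Int), a < g.length → b < g.length →
        g.getD a 0 = g.getD b 0 → dfsA m rest (g.set a v) = dfsA m rest (g.set b v))
    (hfun : ∀ g, packB m rest [] g PySem.Set.empty = dfsA m rest g) :
    ∀ (post pre : List Int) (seen : PySem.Set Int),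
      (∀ v ∈ seen, ∃ j, j < pre.length ∧ (pre ++ post).getD j 0 = v ∧
          (v + c ≤ m → dfsA m rest ((pre ++ post).set j (v + c)) = false)) →
      packB m (c :: rest) pre post seen
        = tryA m c (dfsA m rest) (pre ++ post) pre.length post.length := by
  intro post
  induction post with
  | nil => intro pre seen _; simp [packB, tryA]
  | cons s post ih =>
    intro pre seen hinv
    have hGs : (pre ++ s :: post).getD pre.length 0 = s := zip_getD pre s post
    have hlen : pre.length < (pre ++ s :: post).length := by simp
    have happ : (pre ++ [s]) ++ post = pre ++ s :: post := by simp
    have hplen : (pre ++ [s]).length = pre.length + 1 := by simp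
    have hset : (pre ++ s :: post).set pre.length (s + c) = pre ++ (s + c) :: post :=
      zip_set pre s (s + c) post
    -- transfer of the invariant one step to the right, plus (optionally) the new failure
    have step : ∀ (seen' : PySem.Set Int),
        (∀ v ∈ seen', v ∈ seen ∨ (v = s ∧ (s + c ≤ m → dfsA m rest (pre ++ (s + c) :: post) = false))) →
        packB m (c :: rest) (pre ++ [s]) post seen'
          = tryA m c (dfsA m rest) (pre ++ s :: post) (pre.length + 1) post.length := by
      intro seen' hs
      have h := ih (pre ++ [s]) seen' ?_
      · rw [happ, hplen] at h; exact h
      · intro v hv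
        rw [happ, hplen]
        rcases hs v hv with hv' | ⟨hv1, hv2⟩
        · obtain ⟨j', h1, h2, h3⟩ := hinv v hv'
          exact ⟨j', by omega, h2, h3⟩
        · subst hv1
          exact ⟨pre.length, by omega, hGs, fun hc => by rw [hset]; exact hv2 hc⟩
    simp only [packB, tryA, List.length_cons, ← List.getD_eq_getElem?_getD, hGs]
    by_cases hmem : PySem.Set.contains seen s
    · -- skipped: an earlier group with the same current sum already failed
      rw [if_pos hmem]
      obtain ⟨j, hji, hjv, hjf⟩ := hinv s ((PySem.Set.contains_iff _ _).mp hmem)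
      have hj : j < (pre ++ s :: post).length := by simp; omega
      have hcont := step seen (fun v hv => Or.inl hv)
      by_cases hg : s + c ≤ m
      · have hfail : dfsA m rest ((pre ++ s :: post).set pre.length (s + c)) = false := by
          rw [hcongr _ pre.length j _ hlen hj (by rw [hGs, hjv])]
          exact hjf hg
        rw [if_pos hg, hfail]
        simpa using hcont
      · rw [if_neg hg]; exact hcont
    · rw [if_neg hmem]
      by_cases hg : s + c ≤ m
      · rw [if_pos hg]
        by_cases hok : packB m rest [] (pre ++ (s + c) :: post) PySem.Set.empty = true
        · have hd : dfsA m rest (pre ++ (s + c) :: post) = true := by rw [← hfun]; exact hok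
          rw [hset]
          simp only [hg, hok, hd]
          simp [hok]
        · have hfalse : dfsA m rest (pre ++ (s + c) :: post) = false := by
            rw [← hfun]; exact Bool.eq_false_iff.mpr (fun h => hok h)
          have hand : (decide (s + c ≤ m) && packB m rest [] (pre ++ (s + c) :: post) PySem.Set.empty) = false := by
            rw [hfun, hfalse]; simp
          rw [hand, if_neg (by simp), hset, hfalse]
          simp only [Bool.false_eq_true, if_neg, reduceIte]
          apply step
          intro v hv
          rcases (PySem.Set.mem_add _ _ _).mp hv with hv | hv
          · exact Or.inl hv
          · exact Or.inr ⟨hv, fun _ => hfalse⟩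
      · have hand : (decide (s + c ≤ m) && packB m rest [] (pre ++ (s + c) :: post) PySem.Set.empty) = false := by
          simp [hg]
        rw [hand, if_neg (by simp), if_neg hg]
        apply step
        intro v hv
        rcases (PySem.Set.mem_add _ _ _).mp hv with hv | hv
        · exact Or.inl hv
        · exact Or.inr ⟨hv, fun hc => absurd hc hg⟩

theorem packB_eq_dfsA (m : Int) : ∀ (items groups : List Int),
    packB m items [] groups PySem.Set.empty = dfsA m items groups := by
  intro items
  induction items with
  | nil => intro g; simp [packB, dfsA]
  | cons c rest ih =>
    intro g
    have := packB_step m c rest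
      (fun g a b v ha hb hEq => dfsA_set_congr m rest g a b v ha hb hEq)
      ih g [] PySem.Set.empty (by intro v hv; simp [PySem.Set.empty] at hv)
    simpa [dfsA] using this

theorem feasB_eq_checkA (cookies : List Int) (k : Int) (m : Int) :
    feasB cookies k m = checkA cookies k m := by
  unfold feasB checkA; rw [packB_eq_dfsA]

-- fdiv by 2 rewritten so omega can reason about the midpoint
theorem floordiv_two (a : Int) : PySem.Int.floordiv a 2 = a / 2 := by
  simp [PySem.Int.floordiv, Int.fdiv_eq_ediv]

-- the gap-recursion of B simulates A's fuelled while-loop step for step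
theorem searchB_eq_bsearchA (cookies : List Int) (k : Int) :
    ∀ (fuel : Nat) (lo hi : Int), (hi + 1 - lo).toNat ≤ fuel →
      bsearchA cookies k fuel lo hi = searchB cookies k lo (hi + 1 - lo).toNat := by
  intro fuel
  induction fuel with
  | zero =>
    intro lo hi h
    have h0 : (hi + 1 - lo).toNat = 0 := by omega
    rw [h0]; simp [bsearchA, searchB]
  | succ fuel ih =>
    intro lo hi h
    by_cases hle : lo ≤ hi
    · obtain ⟨g, hg⟩ : ∃ g, (hi + 1 - lo).toNat = g + 1 := ⟨(hi - lo).toNat, by omega⟩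
      have hmid : PySem.Int.floordiv (lo + hi) 2 = lo + (g / 2 : Nat) := by
        rw [floordiv_two]; omega
      simp only [bsearchA, if_pos hle, hg, searchB, hmid, feasB_eq_checkA]
      by_cases hc : checkA cookies k (lo + (g / 2 : Nat)) = true
      · rw [if_pos hc, if_pos hc]
        have h1 : (lo + (g / 2 : Nat) - 1 + 1 - lo).toNat = g / 2 := by omega
        rw [ih lo (lo + (g / 2 : Nat) - 1) (by omega), h1]
      · rw [if_neg hc, if_neg hc]
        have h1 : (hi + 1 - (lo + (g / 2 : Nat) + 1)).toNat = g - g / 2 := by omega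
        rw [ih (lo + (g / 2 : Nat) + 1) hi (by omega), h1]
    · have : (hi + 1 - lo).toNat = 0 := by omega
      rw [this]
      simp [bsearchA, if_neg hle, searchB]

-- ===== VERDICT (by name: the statement is the Claim_ definition above) =====
theorem distributeCookies_spec : Claim_equal_distributeCookies := by
  intro cookies k _ _
  unfold Spec_distributeCookies distributeCookies distributeCookies_alt
  simp only []
  rw [searchB_eq_bsearchA _ _ _ _ _ (le_refl _)]
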